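-- pv_equiv track=rewrite | github.com/ksumini/Algorithm-Study2.0 | Programmers/주사위 고르기/dori.py | solution
-- ===== SOURCE A (Python) =====
-- def solution(dice):
--     """
--     - 약 2시간 풀이 후 힌트 참조
--     - 승리할 확률이 가장 높은 주사위 조합은 유일함 -> 완전탐색으로 풀이
--     - Product + Combination 을 활용해 가능한 쌍을 구할 수 있음
--     - 경우의수 그대로 구현 후 완전탐색 시 시간초과 발생, 중복되는 계산을 해결해야 함
--         - 리스트B를 정렬 + 이분탐색을 활용해서 승리 경우의수를 O(logN) 으로 구함
--         - 정렬하고 나면 특정 cutoff 이후의 값들은 모두 패배가 되기 때문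
--     """
--     from itertools import combinations as C
--     from itertools import product as P
--     from bisect import bisect_left
--
--     n = len(dice)
--     max_win = -1
--
--     for case_a in C(range(1, n + 1), n // 2):
--         case_b = set(range(1, n + 1)) - set(case_a)
--
--         # 가능한 모든 경우의 주사위들을 던져 나온 수의 합
--         result_a = [sum(x) for x in P(*[dice[x - 1] for x in case_a])]
--         result_b = [sum(x) for x in P(*[dice[x - 1] for x in case_b])]
--         result_b.sort()
--
--         # 이분탐색의 인덱스 -> 승리한 수
--         win_count_a = sum(bisect_left(result_b, num) for num in result_a)
--
--         # 최대 승리를 가진다면 갱신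
--         if win_count_a > max_win:
--             max_win = win_count_a
--             answer = case_a
--
--     return answer
-- ===== SOURCE B (Python) =====
-- def solution(dice):
--     from itertools import combinations as C
--
--     n = len(dice)
--
--     def dist(idxs):
--         # distribution of the sum of the chosen dice: dict sum -> number of throws
--         d = {0: 1}
--         for i in idxs:
--             nd = {}
--             for s, c in d.items():
--                 for f in dice[i - 1]:
--                     nd[s + f] = nd.get(s + f, 0) + c
--             d = nd
--         return d
--
--     best = -1
--     answer = None
--     for case_a in C(range(1, n + 1), n // 2):
--         case_b = [i for i in range(1, n + 1) if i not in case_a]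
--         ia = sorted(dist(case_a).items(), key=lambda t: t[0])
--         ib = sorted(dist(case_b).items(), key=lambda t: t[0])
--         # weighted merge: acc = number of opponent throws strictly below the current sum
--         wins = 0
--         acc = 0
--         j = 0
--         m = len(ib)
--         for s, c in ia:
--             while j < m and ib[j][0] < s:
--                 acc += ib[j][1]
--                 j += 1
--             wins += c * acc
--         if wins > best:
--             best = wins
--             answer = list(case_a)
--     return answer
-- ===== Notes on version B (the rewrite author's own statement) =====
-- stated objective: alternative
-- what changed: Per split, instead of enumerating every throw with itertools.product, sorting the opponent's list and binary-searching (bisect_left) for each own throw, B builds the DISTRIBUTION of sums (dict sum -> count) by dynamic-programming convolution over the chosen dice and counts wins with one weighted merge of the two key-sorted distributions; the combination enumeration order and strict '>' update (hence the returned subset) are unchanged.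
import Mathlib
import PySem

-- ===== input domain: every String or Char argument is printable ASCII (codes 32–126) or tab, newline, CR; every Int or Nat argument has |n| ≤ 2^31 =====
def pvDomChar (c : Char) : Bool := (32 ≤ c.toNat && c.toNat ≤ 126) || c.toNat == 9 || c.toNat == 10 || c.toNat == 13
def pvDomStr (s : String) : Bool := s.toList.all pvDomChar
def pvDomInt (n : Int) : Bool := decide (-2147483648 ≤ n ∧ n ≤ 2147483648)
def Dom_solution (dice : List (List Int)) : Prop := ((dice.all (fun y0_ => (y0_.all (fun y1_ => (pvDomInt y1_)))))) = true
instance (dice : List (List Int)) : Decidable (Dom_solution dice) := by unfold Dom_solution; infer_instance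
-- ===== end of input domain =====

-- B replaces A's per-split itertools.product enumeration + sort + bisect_left counting by a
-- dynamic-programming convolution of sum DISTRIBUTIONS (dict sum -> count) over the chosen dice,
-- counting wins with one weighted merge of the two sorted distributions; the combination
-- enumeration order and strict '>' update (hence the returned subset) are unchanged.
-- Objective: alternative. A's result_b.sort() mutates only a local list; neither version mutates its argument.

-- ===== PORT A =====
-- itertools.product(*lists) in CPython order (leftmost factor varies slowest); exact.
def pyProduct {α : Type} : List (List α) → List (List α)
  | [] => [[]]
  | l :: ls => l.flatMap (fun x => (pyProduct ls).map (x :: ·))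

-- Python's `answer` is first assigned on the first iteration (win_count_a ≥ 0 > -1 always, and
-- the combinations list is never empty since n//2 ≤ n), so the [] initial accumulator is never returned.
def solution (dice : List (List Int)) : List Int :=
  let n : Int := dice.length
  let combos := PySem.List.combinations (PySem.List.pyRange 1 (n + 1) 1) ((PySem.Int.floordiv n 2).toNat)
  let st := combos.foldl (fun (st : Int × List Int) ca =>
    -- case_b = set(range(1, n+1)) - set(case_a); result_b is sorted, so the CPython set
    -- iteration order cannot influence the result; Set.diff keeps the left set's order
    let caseB : List Int := PySem.Set.diff (PySem.Set.ofList (PySem.List.pyRange 1 (n + 1) 1)) (PySem.Set.ofList ca)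
    let resultA := (pyProduct (ca.map (fun x => PySem.List.pyGetD dice (x - 1) []))).map List.sum
    let resultB := PySem.List.sorted ((pyProduct (caseB.map (fun x => PySem.List.pyGetD dice (x - 1) []))).map List.sum) (fun y => y) false
    let win : Int := (resultA.map (fun num => (PySem.List.bisectLeft resultB num : Int))).sum
    if win > st.1 then (win, ca) else st) (-1, [])
  st.2

-- ===== PORT B =====
-- one DP step of dist(idxs): 'nd = {}; for s, c in d.items(): for f in dice[i-1]: nd[s+f] = nd.get(s+f, 0) + c'
def distStep (d : PySem.Dict Int Int) (faces : List Int) : PySem.Dict Int Int :=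
  d.items.foldl (fun nd p =>
    faces.foldl (fun nd f => nd.insert (p.1 + f) (nd.getD (p.1 + f) 0 + p.2)) nd)
    PySem.Dict.empty

-- dist(idxs): distribution of the sum of the chosen dice, starting from {0: 1}
def distLoop (dice : List (List Int)) (idxs : List Int) : PySem.Dict Int Int :=
  idxs.foldl (fun d i => distStep d (PySem.List.pyGetD dice (i - 1) [])) (PySem.Dict.ofList [(0, 1)])

-- the inner 'while j < m and ib[j][0] < s: acc += ib[j][1]; j += 1': the remaining suffix of ib
-- stands for the index j, acc carries the total count of the consumed prefix
def mergeAdvance (s : Int) : List (Int × Int) → Int → (List (Int × Int) × Int)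
  | [], acc => ([], acc)
  | q :: qs, acc => if q.1 < s then mergeAdvance s qs (acc + q.2) else (q :: qs, acc)

-- the 'for s, c in ia' loop of B
def mergeLoop : List (Int × Int) → List (Int × Int) → Int → Int → Int
  | [], _, _, wins => wins
  | p :: ps, ib, acc, wins =>
    let r := mergeAdvance p.1 ib acc
    mergeLoop ps r.1 r.2 (wins + p.2 * r.2)

def solution_alt (dice : List (List Int)) : List Int :=
  let n : Int := dice.length
  let combos := PySem.List.combinations (PySem.List.pyRange 1 (n + 1) 1) ((PySem.Int.floordiv n 2).toNat)
  let st := combos.foldl (fun (st : Int × List Int) ca =>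
    let caseB : List Int := (PySem.List.pyRange 1 (n + 1) 1).filter (fun i => !ca.contains i)
    let ia := PySem.List.sorted (distLoop dice ca).items (fun t => t.1) false
    let ib := PySem.List.sorted (distLoop dice caseB).items (fun t => t.1) false
    let wins : Int := mergeLoop ia ib 0 0
    if wins > st.1 then (wins, ca) else st) (-1, [])
  st.2

-- ===== PRECONDITION & SPEC =====
def Spec_solution (dice : List (List Int)) (out : List Int) : Prop := out = solution_alt dice
instance (dice : List (List Int)) (out : List Int) : Decidable (Spec_solution dice out) := by unfold Spec_solution; infer_instance

-- ===== CLAIM =====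
def Claim_equal_solution : Prop := ∀ (dice : List (List Int)), Dom_solution dice → Spec_solution dice (solution dice)

-- ===== LEMMAS AND PROOFS =====

-- A's set difference produces exactly B's filtered range
lemma caseB_eq (n : Int) (ca : List Int) :
    (PySem.Set.diff (PySem.Set.ofList (PySem.List.pyRange 1 (n + 1) 1)) (PySem.Set.ofList ca) : List Int)
      = (PySem.List.pyRange 1 (n + 1) 1).filter (fun i => !ca.contains i) := by
  have h1 : PySem.Set.ofList (PySem.List.pyRange 1 (n + 1) 1) = PySem.List.pyRange 1 (n + 1) 1 :=
    PySem.Set.ofList_eq_self_of_nodup _ (PySem.List.nodup_pyRange_one 1 (n + 1))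
  unfold PySem.Set.diff
  rw [h1]
  apply List.filter_congr
  intro x _
  simp [PySem.Set.contains, PySem.Set.mem_ofList]

-- weighted sum of an item list under a valuation of the keys
def wsum (l : List (Int × Int)) (g : Int → Int) : Int := (l.map (fun p => p.2 * g p.1)).sum

lemma wsum_nil (g : Int → Int) : wsum [] g = 0 := rfl

lemma wsum_cons (p : Int × Int) (l : List (Int × Int)) (g : Int → Int) :
    wsum (p :: l) g = p.2 * g p.1 + wsum l g := by simp [wsum]

lemma wsum_append (l₁ l₂ : List (Int × Int)) (g : Int → Int) :
    wsum (l₁ ++ l₂) g = wsum l₁ g + wsum l₂ g := by simp [wsum]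

lemma wsum_perm {l₁ l₂ : List (Int × Int)} (h : l₁.Perm l₂) (g : Int → Int) :
    wsum l₁ g = wsum l₂ g := (h.map _).sum_eq

-- overwriting the (unique) entry at key k with weight w changes the weighted sum by (w - v) * g k
lemma wsum_overwrite (ps : List (Int × Int)) (k v w : Int) (g : Int → Int)
    (hnd : (ps.map Prod.fst).Nodup) (hmem : (k, v) ∈ ps) :
    wsum (ps.map (fun p => if p.1 == k then (k, w) else p)) g = wsum ps g - v * g k + w * g k := by
  induction ps with
  | nil => cases hmem
  | cons p ps ih =>
    simp only [List.map_cons, List.nodup_cons] at hnd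
    by_cases hk : p.1 = k
    · have hp : p = (k, v) := by
        rcases List.mem_cons.mp hmem with h | h
        · exact h.symm
        · exfalso
          have : k ∈ ps.map Prod.fst := List.mem_map.mpr ⟨(k, v), h, rfl⟩
          exact hnd.1 (by rw [hk]; exact this)
      have hrest : ps.map (fun p => if p.1 == k then (k, w) else p) = ps := by
        conv_rhs => rw [← List.map_id ps]
        apply List.map_congr_left
        intro q hq
        have hqk : q.1 ≠ k := by
          intro hqe
          have : q.1 ∈ ps.map Prod.fst := List.mem_map.mpr ⟨q, hq, rfl⟩
          exact hnd.1 (by rw [hk, ← hqe]; exact this)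
        simp [hqk]
      rw [List.map_cons, if_pos (by simp [hk]), hrest, wsum_cons, wsum_cons, hp]
      ring
    · have hmem' : (k, v) ∈ ps := by
        rcases List.mem_cons.mp hmem with h | h
        · exact absurd (congrArg Prod.fst h.symm) hk
        · exact h
      rw [List.map_cons, if_neg (by simp [hk]), wsum_cons, wsum_cons, ih hnd.2 hmem']
      ring

-- the update nd[k] = nd.get(k, 0) + c adds c * g k to the weighted sum
lemma wsum_insert_add (d : PySem.Dict Int Int) (k c : Int) (g : Int → Int) (hnd : d.keys.Nodup) :
    wsum (d.insert k (d.getD k 0 + c)).items g = wsum d.items g + c * g k := by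
  by_cases h : d.contains k = true
  · obtain ⟨p, hp, hpk⟩ := List.mem_map.mp ((PySem.Dict.contains_iff_mem_keys d k).mp h)
    obtain ⟨k', v⟩ := p
    have hk' : k' = k := hpk
    subst hk'
    have hv : d.getD k' 0 = v := PySem.Dict.getD_of_mem_items d hp hnd 0
    rw [PySem.Dict.items_insert_of_contains d _ h,
        wsum_overwrite d.items k' v (d.getD k' 0 + c) g hnd hp, hv]
    ring
  · rw [PySem.Dict.items_insert_of_not_contains d _ (by simpa using h),
        PySem.Dict.getD_of_not_contains d 0 (by simpa using h), wsum_append]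
    simp [wsum]

-- the face loop 'for f in faces: nd[s+f] += c'
lemma faces_fold_nodup (faces : List Int) (s c : Int) :
    ∀ (nd : PySem.Dict Int Int), nd.keys.Nodup →
    ((faces.foldl (fun nd f => nd.insert (s + f) (nd.getD (s + f) 0 + c)) nd)).keys.Nodup := by
  induction faces with
  | nil => intro nd h; exact h
  | cons f fs ih =>
    intro nd h
    exact ih _ (PySem.Dict.nodup_keys_insert nd _ _ h)

lemma faces_fold_wsum (faces : List Int) (s c : Int) (g : Int → Int) :
    ∀ (nd : PySem.Dict Int Int), nd.keys.Nodup →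
    wsum ((faces.foldl (fun nd f => nd.insert (s + f) (nd.getD (s + f) 0 + c)) nd)).items g
      = wsum nd.items g + c * (faces.map (fun f => g (s + f))).sum := by
  induction faces with
  | nil => intro nd _; simp
  | cons f fs ih =>
    intro nd h
    rw [List.foldl_cons, ih _ (PySem.Dict.nodup_keys_insert nd _ _ h),
        wsum_insert_add nd (s + f) c g h]
    simp
    ring

-- the item loop of one DP step
lemma items_fold_nodup (faces : List Int) :
    ∀ (ps : List (Int × Int)) (nd : PySem.Dict Int Int), nd.keys.Nodup →
    ((ps.foldl (fun nd p =>
        faces.foldl (fun nd f => nd.insert (p.1 + f) (nd.getD (p.1 + f) 0 + p.2)) nd) nd)).keys.Nodup := by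
  intro ps
  induction ps with
  | nil => intro nd h; exact h
  | cons p ps ih =>
    intro nd h
    exact ih _ (faces_fold_nodup faces p.1 p.2 nd h)

lemma items_fold_wsum (faces : List Int) (g : Int → Int) :
    ∀ (ps : List (Int × Int)) (nd : PySem.Dict Int Int), nd.keys.Nodup →
    wsum ((ps.foldl (fun nd p =>
        faces.foldl (fun nd f => nd.insert (p.1 + f) (nd.getD (p.1 + f) 0 + p.2)) nd) nd)).items g
      = wsum nd.items g + wsum ps (fun s => (faces.map (fun f => g (s + f))).sum) := by
  intro ps
  induction ps with
  | nil => intro nd _; simp [wsum_nil]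
  | cons p ps ih =>
    intro nd h
    rw [List.foldl_cons, ih _ (faces_fold_nodup faces p.1 p.2 nd h),
        faces_fold_wsum faces p.1 p.2 g nd h, wsum_cons]
    ring

lemma distStep_nodup (d : PySem.Dict Int Int) (faces : List Int) : (distStep d faces).keys.Nodup := by
  unfold distStep
  exact items_fold_nodup faces d.items PySem.Dict.empty (by simp)

lemma distStep_wsum (d : PySem.Dict Int Int) (faces : List Int) (g : Int → Int) :
    wsum (distStep d faces).items g = wsum d.items (fun s => (faces.map (fun f => g (s + f))).sum) := by
  unfold distStep
  rw [items_fold_wsum faces g d.items PySem.Dict.empty (by simp)]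
  have : wsum PySem.Dict.empty.items g = 0 := rfl
  rw [this, zero_add]

lemma sum_map_flatMap {α β : Type} (l : List α) (f : α → List β) (h : β → Int) :
    ((l.flatMap f).map h).sum = (l.map (fun a => ((f a).map h).sum)).sum := by
  induction l with
  | nil => rfl
  | cons a l ih => simp [List.flatMap_cons, ih]

-- appending one die to the product multiplies sums out at the right
lemma prodsum_append (dss : List (List Int)) (d : List Int) :
    ∀ (g : Int → Int),
    ((pyProduct (dss ++ [d])).map (fun t => g t.sum)).sum
      = ((pyProduct dss).map (fun t => (d.map (fun f => g (t.sum + f))).sum)).sum := by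
  induction dss with
  | nil =>
    intro g
    simp only [List.nil_append]
    rw [show pyProduct [d] = d.flatMap (fun a => (pyProduct ([] : List (List Int))).map (a :: ·)) from rfl]
    rw [sum_map_flatMap]
    simp [pyProduct]
  | cons x dss ih =>
    intro g
    simp only [List.cons_append]
    rw [show pyProduct (x :: (dss ++ [d])) = x.flatMap (fun a => (pyProduct (dss ++ [d])).map (a :: ·)) from rfl,
        show pyProduct (x :: dss) = x.flatMap (fun a => (pyProduct dss).map (a :: ·)) from rfl,
        sum_map_flatMap, sum_map_flatMap]
    congr 1
    apply List.map_congr_left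
    intro y _
    simp only [List.map_map]
    have hl : (List.map ((fun t => g t.sum) ∘ fun x => y :: x) (pyProduct (dss ++ [d])))
        = List.map (fun t => g (y + t.sum)) (pyProduct (dss ++ [d])) := by
      apply List.map_congr_left; intro t _; simp [Function.comp]
    have hr : (List.map ((fun t => (List.map (fun f => g (t.sum + f)) d).sum) ∘ fun x => y :: x) (pyProduct dss))
        = List.map (fun t => (List.map (fun f => g (y + (t.sum + f))) d).sum) (pyProduct dss) := by
      apply List.map_congr_left; intro t _; simp [Function.comp, add_assoc]
    rw [hl, hr]
    exact ih (fun s => g (y + s))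

-- the whole DP over a list of face lists represents the multiset of product sums
lemma dist_fold_spec (dss : List (List Int)) :
    (dss.foldl distStep (PySem.Dict.ofList [(0, 1)])).keys.Nodup ∧
    ∀ (g : Int → Int),
      wsum (dss.foldl distStep (PySem.Dict.ofList [(0, 1)])).items g
        = ((pyProduct dss).map (fun t => g t.sum)).sum := by
  induction dss using List.reverseRecOn with
  | nil =>
    constructor
    · decide
    · intro g
      have h0 : (PySem.Dict.ofList [((0:Int), (1:Int))]).items = [(0, 1)] := rfl
      simp only [List.foldl_nil, h0, pyProduct]
      simp [wsum]
  | append_singleton dss d ih =>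
    rw [List.foldl_append]
    simp only [List.foldl_cons, List.foldl_nil]
    refine ⟨distStep_nodup _ _, ?_⟩
    intro g
    rw [distStep_wsum _ _ g, ih.2 _, prodsum_append]

-- the while loop consumes exactly the strictly-smaller prefix, adding its weights to acc
lemma mergeAdvance_eq (s : Int) (bs : List (Int × Int)) : ∀ (acc : Int),
    mergeAdvance s bs acc
      = (bs.dropWhile (fun q => q.1 < s), acc + ((bs.takeWhile (fun q => q.1 < s)).map Prod.snd).sum) := by
  induction bs with
  | nil => intro acc; simp [mergeAdvance]
  | cons b bs ih =>
    intro acc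
    by_cases hb : b.1 < s
    · simp [mergeAdvance, hb, ih]
      ring
    · simp [mergeAdvance, hb]

-- the merge over key-sorted ia, entered with ib already advanced past pre (acc = weight of pre),
-- totals c * (weight of the strictly-smaller prefix of pre ++ suf) over the entries of ia
lemma mergeLoop_eq (as : List (Int × Int)) : ∀ (pre suf : List (Int × Int)) (wins : Int),
    as.Pairwise (fun p q => p.1 ≤ q.1) → (∀ p ∈ as, ∀ q ∈ pre, q.1 < p.1) →
    mergeLoop as suf ((pre.map Prod.snd).sum) wins
      = wins + (as.map (fun p =>
          p.2 * (((pre ++ suf).takeWhile (fun q => q.1 < p.1)).map Prod.snd).sum)).sum := by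
  induction as with
  | nil => intro pre suf wins _ _; simp [mergeLoop]
  | cons a as ih =>
    intro pre suf wins hpw hpre
    have hle : ∀ p ∈ as, a.1 ≤ p.1 := (List.pairwise_cons.mp hpw).1
    have hprea : ∀ q ∈ pre, q.1 < a.1 := hpre a List.mem_cons_self
    rw [mergeLoop]
    simp only [mergeAdvance_eq]
    have hw : ((pre ++ suf.takeWhile (fun q => q.1 < a.1)).map Prod.snd).sum
        = (pre.map Prod.snd).sum + ((suf.takeWhile (fun q => q.1 < a.1)).map Prod.snd).sum := by
      simp
    have hrec := ih (pre ++ suf.takeWhile (fun q => q.1 < a.1)) (suf.dropWhile (fun q => q.1 < a.1))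
      (wins + a.2 * ((pre.map Prod.snd).sum + ((suf.takeWhile (fun q => q.1 < a.1)).map Prod.snd).sum))
      (List.pairwise_cons.mp hpw).2
      (by
        intro p hp q hq
        rcases List.mem_append.mp hq with hq | hq
        · exact lt_of_lt_of_le (hprea q hq) (hle p hp)
        · have := List.mem_takeWhile_imp hq
          simp at this
          exact lt_of_lt_of_le this (hle p hp))
    have hjoin : (pre ++ suf.takeWhile (fun q => q.1 < a.1)) ++ suf.dropWhile (fun q => q.1 < a.1) = pre ++ suf := by
      rw [List.append_assoc, List.takeWhile_append_dropWhile]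
    rw [hjoin, hw] at hrec
    rw [hrec]
    have hhead : (pre ++ suf).takeWhile (fun q => q.1 < a.1) = pre ++ suf.takeWhile (fun q => q.1 < a.1) :=
      List.takeWhile_append_of_pos (by intro q hq; simpa using hprea q hq)
    rw [List.map_cons, List.sum_cons, hhead, hw]
    ring

-- on a list sorted by key, the strictly-below-a prefix IS the strictly-below-a filter
lemma takeWhile_eq_filter_sorted {α : Type} (key : α → Int) (a : Int) :
    ∀ (l : List α), l.Pairwise (fun p q => key p ≤ key q) →
    l.takeWhile (fun q => key q < a) = l.filter (fun q => key q < a) := by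
  intro l
  induction l with
  | nil => intro _; rfl
  | cons x l ih =>
    intro h
    obtain ⟨hx, hl⟩ := List.pairwise_cons.mp h
    by_cases hxa : key x < a
    · simp [hxa, ih hl]
    · have : ∀ q ∈ l, ¬ (key q < a) := fun q hq hlt => hxa (lt_of_le_of_lt (hx q hq) hlt)
      simp only [List.takeWhile_cons, List.filter_cons]
      simp only [hxa, decide_false, if_false, Bool.false_eq_true]
      rw [List.filter_eq_nil_iff.mpr (by intro q hq; simpa using this q hq)]

-- filtered weight = weighted indicator sum
lemma filter_weight_eq_wsum (a : Int) : ∀ (l : List (Int × Int)),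
    ((l.filter (fun q => q.1 < a)).map Prod.snd).sum
      = wsum l (fun t => if t < a then 1 else 0) := by
  intro l
  induction l with
  | nil => rfl
  | cons q l ih =>
    by_cases hq : q.1 < a
    · simp [hq, wsum_cons, ih]
    · simp [hq, wsum_cons, ih]

lemma length_takeWhile_eq_findIdx (p : Int → Bool) (l : List Int) :
    (l.takeWhile p).length = l.findIdx (fun a => !p a) := by
  rw [List.takeWhile_eq_take_findIdx_not, List.length_take]
  exact Nat.min_eq_left List.findIdx_le_length

-- bisect_left on a ≤-sorted list is the length of the strictly-smaller prefix
lemma bisectLeft_eq_takeWhile (xs : List Int) (x : Int) (h : xs.Pairwise (· ≤ ·)) :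
    PySem.List.bisectLeft xs x = (xs.takeWhile (fun b => b < x)).length := by
  obtain ⟨hle, hlt, hge⟩ := PySem.List.bisectLeft_spec xs x h
  rw [length_takeWhile_eq_findIdx]
  set b := PySem.List.bisectLeft xs x with hb
  set t := xs.findIdx (fun a => !(decide (a < x))) with ht
  have htle : t ≤ xs.length := List.findIdx_le_length
  rcases lt_trichotomy b t with hc | hc | hc
  · exfalso
    have h1 : (fun a => !(decide (a < x))) (xs[b]'(by omega)) = false := List.not_of_lt_findIdx hc
    have h2 := hge b (by omega) (le_refl _)
    simp at h1
    omega
  · exact hc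
  · exfalso
    have h1 := hlt t (by omega) hc
    have h2 := @List.findIdx_getElem _ (fun a => !(decide (a < x))) xs (by omega)
    simp only [← ht] at h2
    simp at h2
    omega

-- the number of opponent throws strictly below a, read off the distribution dict
lemma cnt_eq (dssB : List (List Int)) (a : Int) :
    wsum (dssB.foldl distStep (PySem.Dict.ofList [(0, 1)])).items (fun t => if t < a then 1 else 0)
      = ((((pyProduct dssB).map List.sum).countP (fun b => b < a) : Int)) := by
  rw [(dist_fold_spec dssB).2 (fun t => if t < a then 1 else 0)]
  have h1 : (pyProduct dssB).map (fun t => if t.sum < a then (1:Int) else 0)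
      = ((pyProduct dssB).map List.sum).map (fun b => if b < a then (1:Int) else 0) := by
    rw [List.map_map]; rfl
  rw [h1]
  have := PySem.List.sum_map_ite_one_zero (fun b => decide (b < a)) ((pyProduct dssB).map List.sum)
  simpa using this

-- per-split equality: A's bisect sum equals B's weighted distribution merge
lemma win_eq (dssA dssB : List (List Int)) :
    ((((pyProduct dssA).map List.sum)).map (fun num =>
        (PySem.List.bisectLeft (PySem.List.sorted ((pyProduct dssB).map List.sum) (fun y => y) false) num : Int))).sum
      = mergeLoop
          (PySem.List.sorted (dssA.foldl distStep (PySem.Dict.ofList [(0, 1)])).items (fun t => t.1) false)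
          (PySem.List.sorted (dssB.foldl distStep (PySem.Dict.ofList [(0, 1)])).items (fun t => t.1) false)
          0 0 := by
  set ra := (pyProduct dssA).map List.sum with hra
  set rb := (pyProduct dssB).map List.sum with hrb
  set da := dssA.foldl distStep (PySem.Dict.ofList [(0, 1)]) with hda
  set db := dssB.foldl distStep (PySem.Dict.ofList [(0, 1)]) with hdb
  set ia := PySem.List.sorted da.items (fun t => t.1) false with hia
  set ib := PySem.List.sorted db.items (fun t => t.1) false with hib
  have hiapw : ia.Pairwise (fun p q => p.1 ≤ q.1) := PySem.List.sorted_pairwise da.items (fun t => t.1)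
  have hibpw : ib.Pairwise (fun p q => p.1 ≤ q.1) := PySem.List.sorted_pairwise db.items (fun t => t.1)
  -- B side: the merge totals c * (#opponent sums < s) over the sorted items of da
  have hB : mergeLoop ia ib 0 0
      = (ia.map (fun p => p.2 * ((rb.countP (fun b => b < p.1) : Int)))).sum := by
    have h0 := mergeLoop_eq ia [] ib 0 hiapw (by simp)
    simp only [List.map_nil, List.sum_nil, List.nil_append, zero_add] at h0
    rw [h0]
    apply congrArg
    apply List.map_congr_left
    intro p _
    rw [takeWhile_eq_filter_sorted (fun q => q.1) p.1 ib hibpw, filter_weight_eq_wsum p.1 ib,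
        wsum_perm ((PySem.List.sorted_perm db.items (fun t => t.1) false)) (fun t => if t < p.1 then 1 else 0),
        hdb, cnt_eq dssB p.1, ← hrb]
  rw [hB]
  -- fold B's outer sum back to the dict, then out to the multiset ra
  have hperm : ia.Perm da.items := PySem.List.sorted_perm da.items (fun t => t.1) false
  have h2 : (ia.map (fun p => p.2 * ((rb.countP (fun b => b < p.1) : Int)))).sum
      = (da.items.map (fun p => p.2 * ((rb.countP (fun b => b < p.1) : Int)))).sum :=
    (hperm.map _).sum_eq
  have h3 : (da.items.map (fun p => p.2 * ((rb.countP (fun b => b < p.1) : Int)))).sum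
      = ((pyProduct dssA).map (fun t => ((rb.countP (fun b => b < t.sum) : Int)))).sum := by
    rw [hda]
    exact (dist_fold_spec dssA).2 (fun a => ((rb.countP (fun b => b < a) : Int)))
  have h4 : ((pyProduct dssA).map (fun t => ((rb.countP (fun b => b < t.sum) : Int)))).sum
      = (ra.map (fun a => ((rb.countP (fun b => b < a) : Int)))).sum := by
    rw [hra, List.map_map]; rfl
  rw [h2, h3, h4]
  -- A side: each bisect index is the count of strictly smaller opponent sums
  apply congrArg
  apply List.map_congr_left
  intro x _
  have hsb : (PySem.List.sorted rb (fun y => y) false).Pairwise (· ≤ ·) := by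
    have := PySem.List.sorted_pairwise rb (fun y => y)
    simpa using this
  rw [bisectLeft_eq_takeWhile _ x hsb,
      takeWhile_eq_filter_sorted (fun y => y) x _ hsb,
      ← List.countP_eq_length_filter,
      (PySem.List.sorted_perm rb (fun y => y) false).countP_eq]

-- distLoop is the DP fold over the face lists of the chosen dice
lemma distLoop_eq (dice : List (List Int)) (idxs : List Int) :
    distLoop dice idxs
      = (idxs.map (fun x => PySem.List.pyGetD dice (x - 1) [])).foldl distStep (PySem.Dict.ofList [(0, 1)]) := by
  rw [distLoop, List.foldl_map]

-- ===== VERDICT (by name: the statement is the Claim_ definition above) =====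
theorem solution_spec : Claim_equal_solution := by
  intro dice _
  show solution dice = solution_alt dice
  simp only [solution, solution_alt]
  congr 2
  funext st ca
  simp only [caseB_eq, distLoop_eq]
  rw [← win_eq]
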